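-- pv_equiv track=rewrite | github.com/pypi-data/pypi-mirror-402 | packages/contextrouter/contextrouter-0.11.1.tar.gz/contextrouter-0.11.1/src/contextrouter/modules/ingestion/rag/plugins/book.py | _group_toc_by_page
-- ===== SOURCE A (Python) =====
-- def _group_toc_by_page(chapter_toc: list[tuple[int, str, int]]) -> list[tuple[str, int]]:
--     """Group TOC entries by page number and merge subchapters.
--
--     When multiple entries share the same page, combines them as:
--     "Main Chapter [Subchapter]"
--
--     Args:
--         chapter_toc: List of (level, title, page) tuples
--
--     Returns:
--         List of (merged_title, page) tuples
--     """
--     grouped: dict[int, list[tuple[int, str]]] = {}  # page -> [(level, title), ...]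
--
--     for level, title, page in chapter_toc:
--         if page not in grouped:
--             grouped[page] = []
--         grouped[page].append((level, title))
--
--     # Merge entries on same page
--     merged: list[tuple[str, int]] = []
--     for page in sorted(grouped.keys()):
--         entries = grouped[page]
--
--         if len(entries) == 1:
--             # Single entry, use as-is
--             merged.append((entries[0][1], page))
--         else:
--             # Multiple entries on same page - merge them
--             # Sort by level (lower level = main chapter)
--             entries_sorted = sorted(entries, key=lambda x: x[0])
--             main_chapter = entries_sorted[0][1]  # Lowest level = main
--             subchapters = [title for level, title in entries_sorted[1:]]  # Higher levels = subs
--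
--             if subchapters:
--                 # Format: "Main Chapter [Subchapter1] [Subchapter2]"
--                 sub_str = "] [".join(subchapters)
--                 merged_title = f"{main_chapter} [{sub_str}]"
--             else:
--                 merged_title = main_chapter
--
--             merged.append((merged_title, page))
--
--     return merged
-- ===== SOURCE B (Python) =====
-- def _group_toc_by_page(chapter_toc: list[tuple[int, str, int]]) -> list[tuple[str, int]]:
--     """Group TOC entries by page and merge titles, via one stable sort.
--
--     Sort all entries once by (page, level); same-page entries then form
--     consecutive runs already ordered by level, so a single linear scan
--     emits one merged title per run. No dict and no per-group re-sort.
--     """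
--     s = sorted(chapter_toc, key=lambda e: (e[2], e[0]))
--     merged: list[tuple[str, int]] = []
--     i = 0
--     n = len(s)
--     while i < n:
--         page = s[i][2]
--         j = i
--         while j < n and s[j][2] == page:
--             j += 1
--         titles = [title for _, title, _ in s[i:j]]
--         if len(titles) == 1:
--             merged.append((titles[0], page))
--         else:
--             merged.append((titles[0] + " [" + "] [".join(titles[1:]) + "]", page))
--         i = j
--     return merged
-- ===== Notes on version B (the rewrite author's own statement) =====
-- stated objective: alternative
-- what changed: Replaces the dict-of-pages grouping with per-group re-sorts by one stable sort of the whole list on (page, level) followed by a single linear scan over consecutive same-page runs.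
import Mathlib
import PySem

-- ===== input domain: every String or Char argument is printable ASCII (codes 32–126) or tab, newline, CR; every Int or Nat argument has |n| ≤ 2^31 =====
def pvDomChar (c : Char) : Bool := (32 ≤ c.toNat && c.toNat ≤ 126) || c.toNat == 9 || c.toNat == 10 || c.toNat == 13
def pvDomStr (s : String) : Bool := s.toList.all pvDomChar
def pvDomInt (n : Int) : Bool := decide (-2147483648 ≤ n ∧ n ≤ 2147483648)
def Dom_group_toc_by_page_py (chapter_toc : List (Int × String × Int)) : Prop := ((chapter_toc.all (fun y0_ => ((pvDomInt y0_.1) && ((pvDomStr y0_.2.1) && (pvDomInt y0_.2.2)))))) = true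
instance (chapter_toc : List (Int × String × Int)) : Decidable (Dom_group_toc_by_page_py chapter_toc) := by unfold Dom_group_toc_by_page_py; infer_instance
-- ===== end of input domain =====

-- B replaces A's dict-of-pages grouping (with a per-group re-sort) by one stable sort of the
-- whole list on (page, level) plus a single linear scan over the consecutive same-page runs
-- (objective: alternative algorithm of the same cost class; return values proved equal).

-- ===== PORT A =====
-- grouped: dict page -> [(level, title), ...] ('if page not in grouped: grouped[page] = []' then append)
def pvGroupDict (chapter_toc : List (Int × String × Int)) : PySem.Dict Int (List (Int × String)) :=
  chapter_toc.foldl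
    (fun d x =>
      let d' := if d.contains x.2.2 then d else d.insert x.2.2 []
      d'.insert x.2.2 (d'.getD x.2.2 [] ++ [(x.1, x.2.1)]))
    PySem.Dict.empty
def group_toc_by_page_py (chapter_toc : List (Int × String × Int)) : List (String × Int) :=
  (PySem.List.sorted (pvGroupDict chapter_toc).keys (fun p => p) false).foldl
    (fun merged page =>
      let entries := (pvGroupDict chapter_toc).getD page []
      if entries.length == 1 then
        merged ++ [((PySem.List.pyGetD entries 0 (0, "")).2, page)]
      else
        let entries_sorted := PySem.List.sorted entries (fun e => e.1) false
        let main_chapter := (PySem.List.pyGetD entries_sorted 0 (0, "")).2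
        let subchapters := (PySem.List.slice entries_sorted (some 1) none).map (fun e => e.2)
        let merged_title :=
          if subchapters ≠ [] then
            main_chapter ++ " [" ++ PySem.Str.join "] [" subchapters ++ "]"
          else main_chapter
        merged ++ [(merged_title, page)])
    []

-- ===== PORT B =====
-- the scan over consecutive same-page runs of the sorted list (the while loop of Source B)
def pvAltRun (s : List (Int × String × Int)) : List (String × Int) :=
  match s with
  | [] => []
  | x :: rest =>
      let titles := (x :: rest.takeWhile (fun y => y.2.2 == x.2.2)).map (fun y => y.2.1)
      (if titles.length == 1 then (PySem.List.pyGetD titles 0 "", x.2.2)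
       else (PySem.List.pyGetD titles 0 "" ++ " [" ++
               PySem.Str.join "] [" (PySem.List.slice titles (some 1) none) ++ "]", x.2.2))
      :: pvAltRun (rest.dropWhile (fun y => y.2.2 == x.2.2))
termination_by s.length
decreasing_by
  simp only [List.length_cons]
  exact Nat.lt_succ_of_le (List.length_dropWhile_le _ _)
def group_toc_by_page_py_alt (chapter_toc : List (Int × String × Int)) : List (String × Int) :=
  pvAltRun (PySem.List.sorted2 chapter_toc (fun e => e.2.2) (fun e => e.1) false)

-- ===== PRECONDITION & SPEC =====
def Spec_group_toc_by_page_py (chapter_toc : List (Int × String × Int)) (out : List (String × Int)) : Prop := out = group_toc_by_page_py_alt chapter_toc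
instance (chapter_toc : List (Int × String × Int)) (out : List (String × Int)) : Decidable (Spec_group_toc_by_page_py chapter_toc out) := by unfold Spec_group_toc_by_page_py; infer_instance

-- ===== CLAIM (what is proved, stated in full; the proofs are below) =====
def Claim_equal_group_toc_by_page_py : Prop := ∀ (chapter_toc : List (Int × String × Int)), Dom_group_toc_by_page_py chapter_toc → Spec_group_toc_by_page_py chapter_toc (group_toc_by_page_py chapter_toc)

-- ===== LEMMAS AND PROOFS =====
-- canonical form both ports are reduced to: the distinct pages in increasing order, and per
-- page its entries stably sorted by level, rendered to one merged (title, page) pair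
def pvPages (l : List (Int × String × Int)) : List Int :=
  PySem.List.sorted (PySem.Set.ofList (l.map (fun x => x.2.2))) (fun p => p) false
def pvGrp (l : List (Int × String × Int)) (p : Int) : List (Int × String × Int) :=
  PySem.List.sorted (l.filter (fun x => x.2.2 == p)) (fun x => x.1) false
def pvRender (p : Int) (run : List (Int × String × Int)) : String × Int :=
  let titles := run.map (fun y => y.2.1)
  if titles.length == 1 then (PySem.List.pyGetD titles 0 "", p)
  else (PySem.List.pyGetD titles 0 "" ++ " [" ++
          PySem.Str.join "] [" (PySem.List.slice titles (some 1) none) ++ "]", p)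
def pvCanon (l : List (Int × String × Int)) : List (String × Int) :=
  (pvPages l).map (fun p => pvRender p (pvGrp l p))

-- the lexicographic (page, level) comparison of sorted2, and the bare level comparison
def pvB2 : (Int × String × Int) → (Int × String × Int) → Bool :=
  fun a b => decide (a.2.2 < b.2.2) || (!decide (b.2.2 < a.2.2) && decide (a.1 < b.1))
def pvBL : (Int × String × Int) → (Int × String × Int) → Bool :=
  fun a b => decide (a.1 < b.1)

-- generic insertBy facts
theorem pv_insertBy_skip {α : Type} (bf : α → α → Bool) (x : α) (ys zs : List α)
    (h : ∀ y ∈ ys, bf x y = false) :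
    PySem.List.insertBy bf x (ys ++ zs) = ys ++ PySem.List.insertBy bf x zs := by
  induction ys with
  | nil => rfl
  | cons y ys ih =>
      simp only [List.cons_append, PySem.List.insertBy, h y (by simp)]
      simp only [Bool.false_eq_true, if_false, List.cons.injEq, true_and]
      exact ih (fun y hy => h y (by simp [hy]))

theorem pv_insertBy_local {α : Type} (bf bg : α → α → Bool) (x : α) (ys zs : List α)
    (h1 : ∀ y ∈ ys, bf x y = bg x y) (h2 : ∀ z ∈ zs, bf x z = true) :
    PySem.List.insertBy bf x (ys ++ zs) = PySem.List.insertBy bg x ys ++ zs := by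
  induction ys with
  | nil =>
      cases zs with
      | nil => rfl
      | cons z zs => simp [PySem.List.insertBy, h2 z (by simp)]
  | cons y ys ih =>
      have hy := h1 y (by simp)
      simp only [List.cons_append, PySem.List.insertBy, hy]
      by_cases hb : bg x y = true
      · simp [hb]
      · simp only [Bool.not_eq_true] at hb
        simp [hb, ih (fun y hy => h1 y (by simp [hy]))]

theorem pv_insertBy_map {α β : Type} (f : α → β) (key : β → Int) (x : α) (m : List α) :
    PySem.List.insertBy (fun a b => decide (key a < key b)) (f x) (m.map f)
      = (PySem.List.insertBy (fun a b => decide (key (f a) < key (f b))) x m).map f := by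
  induction m with
  | nil => rfl
  | cons y m ih =>
      simp only [List.map_cons, PySem.List.insertBy]
      by_cases hb : key (f x) < key (f y)
      · simp [hb]
      · simp [hb, ih]

theorem pv_sorted_map {α β : Type} (f : α → β) (key : β → Int) (l : List α) :
    PySem.List.sorted (l.map f) key false
      = (PySem.List.sorted l (fun a => key (f a)) false).map f := by
  rw [PySem.List.sorted_eq_foldl_insertBy, PySem.List.sorted_eq_foldl_insertBy]
  induction l using List.reverseRecOn with
  | nil => rfl
  | append_singleton l x ih =>
      simp only [List.map_append, List.map_cons, List.map_nil, List.foldl_append, List.foldl_cons, List.foldl_nil]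
      rw [ih, pv_insertBy_map]

theorem pv_pages_pairwise (l : List (Int × String × Int)) : (pvPages l).Pairwise (· < ·) :=
  PySem.List.sorted_ofList_pairwise_lt _

theorem pv_mem_pages (l : List (Int × String × Int)) (p : Int) :
    p ∈ pvPages l ↔ p ∈ l.map (fun x => x.2.2) := by
  unfold pvPages
  rw [PySem.List.mem_sorted, PySem.Set.mem_ofList]

theorem pv_grp_page (l : List (Int × String × Int)) (p : Int) :
    ∀ y ∈ pvGrp l p, y.2.2 = p := by
  intro y hy
  unfold pvGrp at hy
  rw [PySem.List.mem_sorted] at hy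
  simpa using (List.mem_filter.mp hy).2

theorem pv_grp_ne_nil {l : List (Int × String × Int)} {p : Int} (hp : p ∈ pvPages l) :
    pvGrp l p ≠ [] := by
  unfold pvGrp
  rw [Ne, PySem.List.sorted_eq_nil_iff]
  rw [pv_mem_pages] at hp
  obtain ⟨a, ha, hpa⟩ := List.mem_map.mp hp
  intro hnil
  have hmem : a ∈ l.filter (fun x => x.2.2 == p) := List.mem_filter.mpr ⟨ha, by simp [hpa]⟩
  simp [hnil] at hmem

theorem pv_sorted_app (m : List (Int × String × Int)) (y : Int × String × Int) :
    PySem.List.sorted (m ++ [y]) (fun e => e.1) false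
      = PySem.List.insertBy pvBL y (PySem.List.sorted m (fun e => e.1) false) := by
  rw [PySem.List.sorted_eq_foldl_insertBy, PySem.List.sorted_eq_foldl_insertBy, List.foldl_append]
  rfl

theorem pv_ofList_app (ys : List Int) (k : Int) :
    PySem.Set.ofList (ys ++ [k]) = PySem.Set.add (PySem.Set.ofList ys) k := by
  rw [PySem.Set.ofList_eq_foldl, PySem.Set.ofList_eq_foldl, List.foldl_append]
  rfl

theorem pv_set_add_mem {s : PySem.Set Int} {k : Int} (h : k ∈ s) : PySem.Set.add s k = s := by
  simp [PySem.Set.add, PySem.Set.contains, h]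

theorem pv_set_add_not_mem {s : PySem.Set Int} {k : Int} (h : k ∉ s) :
    PySem.Set.add s k = s ++ [k] := by
  simp [PySem.Set.add, PySem.Set.contains, h]

theorem pv_grp_other {l : List (Int × String × Int)} {x : Int × String × Int} {p : Int}
    (h : p ≠ x.2.2) : pvGrp (l ++ [x]) p = pvGrp l p := by
  unfold pvGrp
  rw [List.filter_append, show List.filter (fun z => z.2.2 == p) [x] = [] by
    simp [Ne.symm h], List.append_nil]


theorem pv_ins_mem (ps : List Int) (G : Int → List (Int × String × Int))
    (hps : ps.Pairwise (· < ·))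
    (hG : ∀ p ∈ ps, ∀ y ∈ G p, y.2.2 = p)
    (x : Int × String × Int) (hk : x.2.2 ∈ ps) :
    PySem.List.insertBy pvB2 x (ps.flatMap G)
      = ps.flatMap (fun p => if p = x.2.2 then PySem.List.insertBy pvBL x (G p) else G p) := by
  induction ps with
  | nil => cases hk
  | cons p ps ih =>
      have hlt : ∀ q ∈ ps, p < q := (List.pairwise_cons.mp hps).1
      have hps' := (List.pairwise_cons.mp hps).2
      simp only [List.flatMap_cons]
      by_cases hpk : p = x.2.2
      · rw [if_pos hpk]
        have h1 : ∀ y ∈ G p, pvB2 x y = pvBL x y := by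
          intro y hy
          have hy2 : y.2.2 = p := hG p (by simp) y hy
          simp [pvB2, pvBL, hy2, hpk]
        have h2 : ∀ z ∈ ps.flatMap G, pvB2 x z = true := by
          intro z hz
          obtain ⟨q, hq, hzq⟩ := List.mem_flatMap.mp hz
          have hz2 : z.2.2 = q := hG q (by simp [hq]) z hzq
          have : x.2.2 < z.2.2 := by rw [hz2, ← hpk]; exact hlt q hq
          simp [pvB2, this]
        rw [pv_insertBy_local pvB2 pvBL x (G p) (ps.flatMap G) h1 h2]
        congr 1
        refine List.flatMap_congr (fun q hq => ?_)
        have hqne : q ≠ x.2.2 := by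
          intro hqe
          have h2 := hlt q hq
          rw [hqe, ← hpk] at h2
          exact lt_irrefl _ h2
        rw [if_neg hqne]
      · have hkps : x.2.2 ∈ ps := by
          rcases List.mem_cons.mp hk with h | h
          · exact absurd h.symm hpk
          · exact h
        have hpx : p < x.2.2 := hlt _ hkps
        have h0 : ∀ y ∈ G p, pvB2 x y = false := by
          intro y hy
          have hy2 : y.2.2 = p := hG p (by simp) y hy
          simp [pvB2, hy2]
          constructor
          · omega
          · intro h; omega
        rw [pv_insertBy_skip pvB2 x (G p) (ps.flatMap G) h0, if_neg (fun h => hpk h),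
          ih hps' (fun q hq => hG q (by simp [hq])) hkps]


theorem pv_ins_new (ps : List Int) (G : Int → List (Int × String × Int))
    (hps : ps.Pairwise (· < ·))
    (hG : ∀ p ∈ ps, ∀ y ∈ G p, y.2.2 = p)
    (hne : ∀ p ∈ ps, G p ≠ [])
    (x : Int × String × Int) (hk : x.2.2 ∉ ps) :
    PySem.List.insertBy pvB2 x (ps.flatMap G)
      = (ps.takeWhile (· < x.2.2)).flatMap G ++ x :: (ps.dropWhile (· < x.2.2)).flatMap G := by
  induction ps with
  | nil => rfl
  | cons p ps ih =>
      have hlt : ∀ q ∈ ps, p < q := (List.pairwise_cons.mp hps).1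
      have hps' := (List.pairwise_cons.mp hps).2
      by_cases hplt : p < x.2.2
      · have h0 : ∀ y ∈ G p, pvB2 x y = false := by
          intro y hy
          have hy2 : y.2.2 = p := hG p (by simp) y hy
          simp [pvB2, hy2]
          constructor
          · omega
          · intro h; omega
        simp only [List.flatMap_cons, List.takeWhile_cons, List.dropWhile_cons, decide_eq_true_eq, hplt, if_pos]
        rw [pv_insertBy_skip pvB2 x (G p) (ps.flatMap G) h0,
          ih hps' (fun q hq => hG q (by simp [hq])) (fun q hq => hne q (by simp [hq]))
            (fun h => hk (by simp [h]))]
        simp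
      · have hpx : x.2.2 < p := by
          have : p ≠ x.2.2 := fun h => hk (by simp [h])
          omega
        obtain ⟨y, ys, hGp⟩ := List.exists_cons_of_ne_nil (hne p (by simp))
        have hy2 : y.2.2 = p := hG p (by simp) y (by simp [hGp])
        have hb : pvB2 x y = true := by simp [pvB2, hy2]; omega
        simp only [List.flatMap_cons, List.takeWhile_cons, List.dropWhile_cons, decide_eq_true_eq, hplt, if_false]
        rw [hGp]
        simp only [List.cons_append, PySem.List.insertBy, hb, if_pos]
        simp

theorem pv_sorted2_decomp (l : List (Int × String × Int)) :
    PySem.List.sorted2 l (fun e => e.2.2) (fun e => e.1) false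
      = (pvPages l).flatMap (pvGrp l) := by
  show l.foldl (fun acc x => PySem.List.insertBy pvB2 x acc) []
        = (pvPages l).flatMap (pvGrp l)
  induction l using List.reverseRecOn with
  | nil => rfl
  | append_singleton l x ih =>
      rw [List.foldl_append, List.foldl_cons, List.foldl_nil, ih]
      have hps := pv_pages_pairwise l
      have hG : ∀ p ∈ pvPages l, ∀ y ∈ pvGrp l p, y.2.2 = p := fun p _ => pv_grp_page l p
      have hne : ∀ p ∈ pvPages l, pvGrp l p ≠ [] := fun p hp => pv_grp_ne_nil hp
      by_cases hmem : x.2.2 ∈ pvPages l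
      · rw [pv_ins_mem (pvPages l) (pvGrp l) hps hG x hmem]
        have hmemset : x.2.2 ∈ PySem.Set.ofList (l.map (fun z => z.2.2)) := by
          rw [← PySem.List.mem_sorted (rev := false) (key := fun p => p)]
          exact hmem
        have hpages : pvPages (l ++ [x]) = pvPages l := by
          unfold pvPages
          rw [List.map_append, List.map_cons, List.map_nil, pv_ofList_app,
            pv_set_add_mem hmemset]
        rw [hpages]
        refine (List.flatMap_congr (fun p hp => ?_)).symm
        by_cases hpe : p = x.2.2
        · rw [if_pos hpe, hpe]
          unfold pvGrp
          rw [List.filter_append, show List.filter (fun z => z.2.2 == x.2.2) [x] = [x] by simp]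
          exact pv_sorted_app _ x
        · rw [if_neg hpe]
          exact pv_grp_other hpe
      · rw [pv_ins_new (pvPages l) (pvGrp l) hps hG hne x hmem]
        have hmemset : x.2.2 ∉ PySem.Set.ofList (l.map (fun z => z.2.2)) := by
          intro h
          exact hmem (by rw [← PySem.List.mem_sorted (rev := false) (key := fun p => p)] at h; exact h)
        have htwdw : (pvPages l).takeWhile (· < x.2.2) ++ (pvPages l).dropWhile (· < x.2.2) = pvPages l :=
          List.takeWhile_append_dropWhile
        have hpw : ((pvPages l).takeWhile (· < x.2.2) ++ (pvPages l).dropWhile (· < x.2.2)).Pairwise (· < ·) := by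
          rw [htwdw]; exact hps
        obtain ⟨htw, hdw, hcross⟩ := List.pairwise_append.mp hpw
        have htwk : ∀ a ∈ (pvPages l).takeWhile (· < x.2.2), a < x.2.2 := by
          intro a ha
          simpa using List.mem_takeWhile_imp ha
        have hdwmem : ∀ b ∈ (pvPages l).dropWhile (· < x.2.2), b ∈ pvPages l := by
          intro b hb
          exact (List.dropWhile_sublist _).mem hb
        have htwmem : ∀ b ∈ (pvPages l).takeWhile (· < x.2.2), b ∈ pvPages l := by
          intro b hb
          exact (List.takeWhile_sublist _).mem hb
        have hdwk : ∀ b ∈ (pvPages l).dropWhile (· < x.2.2), x.2.2 < b := by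
          cases hdwc : (pvPages l).dropWhile (· < x.2.2) with
          | nil => simp
          | cons b0 dtl =>
              have hhead := List.head?_dropWhile_not (fun a => decide (a < x.2.2)) (pvPages l)
              rw [hdwc] at hhead
              simp only [List.head?_cons] at hhead
              have hb0 : ¬ b0 < x.2.2 := by simpa using hhead
              have hb0ne : b0 ≠ x.2.2 := by
                intro h
                exact hmem (h ▸ hdwmem b0 (by rw [hdwc]; simp))
              intro b hb
              rcases List.mem_cons.mp hb with rfl | hb'
              · omega
              · have hlt : b0 < b := (List.pairwise_cons.mp (hdwc ▸ hdw)).1 b hb'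
                omega
        have hpages : pvPages (l ++ [x])
            = (pvPages l).takeWhile (· < x.2.2) ++ x.2.2 :: (pvPages l).dropWhile (· < x.2.2) := by
          unfold pvPages
          rw [List.map_append, List.map_cons, List.map_nil, pv_ofList_app,
            pv_set_add_not_mem hmemset]
          apply PySem.List.sorted_eq_of_perm_of_pairwise_lt
          · have h1 : ((pvPages l).takeWhile (· < x.2.2) ++ x.2.2 :: (pvPages l).dropWhile (· < x.2.2)).Perm
                (x.2.2 :: ((pvPages l).takeWhile (· < x.2.2) ++ (pvPages l).dropWhile (· < x.2.2))) :=
              List.perm_middle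
            rw [htwdw] at h1
            exact h1.trans (((PySem.List.sorted_perm _ _ _).cons _).trans
              (List.perm_append_singleton _ _).symm)
          · refine List.pairwise_append.mpr ⟨htw, List.pairwise_cons.mpr ⟨hdwk, hdw⟩, ?_⟩
            intro a ha b hb
            rcases List.mem_cons.mp hb with rfl | hb'
            · exact htwk a ha
            · exact lt_trans (htwk a ha) (hdwk b hb')
        rw [hpages, List.flatMap_append, List.flatMap_cons]
        have hGk : pvGrp (l ++ [x]) x.2.2 = [x] := by
          unfold pvGrp
          rw [List.filter_append]
          have h1 : l.filter (fun z => z.2.2 == x.2.2) = [] := by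
            rw [List.filter_eq_nil_iff]
            intro a ha hbeq
            apply hmem
            rw [pv_mem_pages]
            exact List.mem_map.mpr ⟨a, ha, by simpa using hbeq⟩
          rw [h1, List.nil_append, show List.filter (fun z => z.2.2 == x.2.2) [x] = [x] by simp]
          rfl
        rw [hGk]
        rw [List.flatMap_congr (l := (pvPages l).takeWhile (· < x.2.2))
              (f := pvGrp (l ++ [x])) (g := pvGrp l)
              (fun p hp => pv_grp_other (fun h => hmem (h ▸ htwmem p hp))),
            List.flatMap_congr (l := (pvPages l).dropWhile (· < x.2.2))
              (f := pvGrp (l ++ [x])) (g := pvGrp l)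
              (fun p hp => pv_grp_other (fun h => hmem (h ▸ hdwmem p hp)))]
        rfl

-- takeWhile/dropWhile over a block decomposition
theorem pv_takeWhile_app {α : Type} (q : α → Bool) (ys zs : List α) (h : ∀ a ∈ ys, q a = true) :
    (ys ++ zs).takeWhile q = ys ++ zs.takeWhile q := by
  induction ys with
  | nil => rfl
  | cons y ys ih =>
      simp [List.cons_append, h y (by simp)]
      exact ih (fun a ha => h a (by simp [ha]))

theorem pv_dropWhile_app {α : Type} (q : α → Bool) (ys zs : List α) (h : ∀ a ∈ ys, q a = true) :
    (ys ++ zs).dropWhile q = zs.dropWhile q := by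
  induction ys with
  | nil => rfl
  | cons y ys ih =>
      simp only [List.cons_append, List.dropWhile_cons, h y (by simp), if_pos]
      exact ih (fun a ha => h a (by simp [ha]))

theorem pv_takeWhile_nil {α : Type} (q : α → Bool) (zs : List α)
    (h : ∀ a ∈ zs, q a = false) : zs.takeWhile q = [] := by
  cases zs with
  | nil => rfl
  | cons z zs => simp [h z (by simp)]

theorem pv_dropWhile_id {α : Type} (q : α → Bool) (zs : List α)
    (h : ∀ a ∈ zs, q a = false) : zs.dropWhile q = zs := by
  cases zs with
  | nil => rfl
  | cons z zs => simp [h z (by simp)]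

theorem pv_altRun_blocks (ps : List Int) (G : Int → List (Int × String × Int))
    (hps : ps.Pairwise (· < ·))
    (hG : ∀ p ∈ ps, ∀ y ∈ G p, y.2.2 = p)
    (hne : ∀ p ∈ ps, G p ≠ []) :
    pvAltRun (ps.flatMap G) = ps.map (fun p => pvRender p (G p)) := by
  induction ps with
  | nil => simp only [List.flatMap_nil, List.map_nil, pvAltRun]
  | cons p ps ih =>
      obtain ⟨y, ys, hGp⟩ := List.exists_cons_of_ne_nil (hne p (by simp))
      have hy2 : y.2.2 = p := hG p (by simp) y (by simp [hGp])
      subst hy2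
      have hys : ∀ a ∈ ys, (a.2.2 == y.2.2) = true := by
        intro a ha
        have : a.2.2 = y.2.2 := hG y.2.2 (by simp) a (by simp [hGp, ha])
        simp [this]
      have hrest : ∀ z ∈ ps.flatMap G, (z.2.2 == y.2.2) = false := by
        intro z hz
        obtain ⟨q, hq, hzq⟩ := List.mem_flatMap.mp hz
        have hz2 : z.2.2 = q := hG q (by simp [hq]) z hzq
        have hpq : y.2.2 < q := (List.pairwise_cons.mp hps).1 q hq
        simp only [hz2, beq_eq_false_iff_ne, ne_eq]
        omega
      rw [List.flatMap_cons, hGp, List.cons_append, pvAltRun]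
      rw [pv_takeWhile_app _ _ _ hys, pv_takeWhile_nil _ _ hrest,
        pv_dropWhile_app _ _ _ hys, pv_dropWhile_id _ _ hrest, List.append_nil]
      rw [ih (List.pairwise_cons.mp hps).2 (fun q hq => hG q (by simp [hq]))
        (fun q hq => hne q (by simp [hq]))]
      simp only [List.map_cons]
      rw [hGp]
      rfl


theorem pv_alt_eq_canon (l : List (Int × String × Int)) :
    group_toc_by_page_py_alt l = pvCanon l := by
  unfold group_toc_by_page_py_alt pvCanon
  rw [pv_sorted2_decomp]
  exact pv_altRun_blocks (pvPages l) (pvGrp l) (pv_pages_pairwise l)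
    (fun p _ => pv_grp_page l p) (fun p hp => pv_grp_ne_nil hp)

theorem pv_if_append {α : Type} (c : Prop) [Decidable c] (acc : List α) (u v : α) :
    (if c then acc ++ [u] else acc ++ [v]) = acc ++ [if c then u else v] := by
  split_ifs <;> rfl


theorem pv_body_render (fl : List (Int × String × Int)) (p : Int) (hne : fl ≠ []) :
    (if ((fl.map (fun x => (x.1, x.2.1))).length == 1) = true then
       ((PySem.List.pyGetD (fl.map (fun x => (x.1, x.2.1))) 0 (0, "")).2, p)
     else
       (if (PySem.List.slice (PySem.List.sorted (fl.map (fun x => (x.1, x.2.1))) (fun e => e.1) false) (some 1) none).map (fun e => e.2) ≠ [] then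
          (PySem.List.pyGetD (PySem.List.sorted (fl.map (fun x => (x.1, x.2.1))) (fun e => e.1) false) 0 (0, "")).2 ++ " [" ++
            PySem.Str.join "] [" ((PySem.List.slice (PySem.List.sorted (fl.map (fun x => (x.1, x.2.1))) (fun e => e.1) false) (some 1) none).map (fun e => e.2)) ++ "]"
        else (PySem.List.pyGetD (PySem.List.sorted (fl.map (fun x => (x.1, x.2.1))) (fun e => e.1) false) 0 (0, "")).2, p))
    = pvRender p (PySem.List.sorted fl (fun x => x.1) false) := by
  have hlen : (PySem.List.sorted fl (fun x => x.1) false).length = fl.length :=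
    PySem.List.length_sorted _ _ _
  have hsne : PySem.List.sorted fl (fun x => x.1) false ≠ [] := by
    rw [Ne, PySem.List.sorted_eq_nil_iff]; exact hne
  obtain ⟨r, rtl, hs⟩ := List.exists_cons_of_ne_nil hsne
  have hes : PySem.List.sorted (fl.map (fun x => (x.1, x.2.1))) (fun e => e.1) false
      = (PySem.List.sorted fl (fun x => x.1) false).map (fun x => (x.1, x.2.1)) :=
    pv_sorted_map _ _ _
  by_cases h1 : fl.length = 1
  · obtain ⟨a, ha⟩ := List.length_eq_one_iff.mp h1
    subst ha
    have hsingle : PySem.List.sorted [a] (fun x : Int × String × Int => x.1) false = [a] := rfl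
    rw [pvRender, hsingle]
    simp [PySem.List.pyGetD_ofNat']
  · have hrtl : rtl ≠ [] := by
      intro h
      rw [hs, h] at hlen
      simp at hlen
      omega
    have hc1 : ((fl.map (fun x => (x.1, x.2.1))).length == 1) = false := by
      simp [h1]
    have hc2 : (((PySem.List.sorted fl (fun x => x.1) false).map (fun y => y.2.1)).length == 1) = false := by
      simp [hlen, h1]
    rw [pvRender]
    simp only [hc1, hc2, Bool.false_eq_true, if_false]
    rw [hes, hs]
    have hslice1 : PySem.List.slice ((r.1, r.2.1) :: rtl.map (fun x => (x.1, x.2.1))) (some 1) none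
        = rtl.map (fun x => (x.1, x.2.1)) := by
      rw [PySem.List.slice_from _ (by norm_num : (0:Int) ≤ 1)]
      rfl
    have hslice2 : PySem.List.slice (r.2.1 :: rtl.map (fun y => y.2.1)) (some 1) none
        = rtl.map (fun y => y.2.1) := by
      rw [PySem.List.slice_from _ (by norm_num : (0:Int) ≤ 1)]
      rfl
    simp [hslice1, hslice2, List.map_map, PySem.List.pyGetD_ofNat', hrtl]
    rfl


theorem pv_dict_eq (l : List (Int × String × Int)) :
    pvGroupDict l
      = l.foldl (fun d x => d.modify x.2.2 [] (fun L => L ++ [(x.1, x.2.1)])) PySem.Dict.empty := by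
  unfold pvGroupDict
  apply PySem.List.foldl_congr_mem
  intro d x _
  by_cases hc : d.contains x.2.2 = true
  · simp only [hc, if_true]
    rfl
  · simp only [Bool.not_eq_true] at hc
    simp only [hc, Bool.false_eq_true, if_false]
    show (d.insert x.2.2 []).insert x.2.2
        (((d.insert x.2.2 []).getD x.2.2 []) ++ [(x.1, x.2.1)])
      = d.insert x.2.2 ((d.getD x.2.2 []) ++ [(x.1, x.2.1)])
    rw [PySem.Dict.getD_insert_self, PySem.Dict.insert_insert_self,
      PySem.Dict.getD_of_not_contains d [] hc]

theorem pv_keys (l : List (Int × String × Int)) :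
    (pvGroupDict l).keys = PySem.Set.ofList (l.map (fun x => x.2.2)) := by
  rw [pv_dict_eq,
    PySem.Dict.keys_foldl_modify_key l (fun x => x.2.2) [] (fun _ x => fun L => L ++ [(x.1, x.2.1)]),
    PySem.Set.ofList_eq_foldl]
  rfl

theorem pv_getD (l : List (Int × String × Int)) (p : Int) :
    (pvGroupDict l).getD p []
      = (l.filter (fun x => x.2.2 == p)).map (fun x => (x.1, x.2.1)) := by
  rw [pv_dict_eq,
    show (l.foldl (fun d x => d.modify x.2.2 [] (fun L => L ++ [(x.1, x.2.1)])) PySem.Dict.empty)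
        = ((l.map (fun x => (x.2.2, (x.1, x.2.1)))).foldl
            (fun d q => d.modify q.1 [] (fun L => L ++ [q.2])) PySem.Dict.empty)
      from (List.foldl_map (f := fun x : Int × String × Int => (x.2.2, (x.1, x.2.1)))
          (g := fun (d : PySem.Dict Int (List (Int × String))) q => d.modify q.1 [] (fun L => L ++ [q.2]))
          (l := l) (init := PySem.Dict.empty)).symm,
    PySem.Dict.getD_foldl_modify_append, PySem.Dict.getD_empty, List.nil_append,
    List.filter_map, List.map_map]
  rfl


theorem pv_a_eq_canon (l : List (Int × String × Int)) :
    group_toc_by_page_py l = pvCanon l := by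
  unfold group_toc_by_page_py
  rw [pv_keys]
  refine Eq.trans (PySem.List.foldl_congr_mem _ _
    (fun acc p => acc ++ [pvRender p (pvGrp l p)]) [] ?_) ?_
  · intro acc p hp
    have hflne : l.filter (fun x => x.2.2 == p) ≠ [] := by
      have h := pv_grp_ne_nil (l := l) (p := p) hp
      rw [pvGrp, Ne, PySem.List.sorted_eq_nil_iff] at h
      exact h
    simp only [pv_getD]
    rw [pv_if_append]
    rw [pv_body_render _ p hflne]
    rfl
  · rw [PySem.List.foldl_append_singleton_eq_map]
    rfl

-- ===== VERDICT (by name: the statement is the Claim_ definition above) =====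
theorem group_toc_by_page_py_spec : Claim_equal_group_toc_by_page_py := by
  intro l _
  show group_toc_by_page_py l = group_toc_by_page_py_alt l
  rw [pv_a_eq_canon, pv_alt_eq_canon]
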